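-- pv_equiv track=rewrite | github.com/JoshuaDodds/cerbomoticzgx | lib/tibberios/core.py | _keep_richest_duplicates
-- ===== SOURCE A (Python) =====
-- from collections import Counter
--
-- def _keep_richest_duplicates(data: list[tuple]) -> list[tuple]:
--     # extract start_times
--     start_times = [row[0] for row in data]
--     # get a count of occurrences to identify duplicates
--     count_occurrences = dict(Counter(start_times))
--     # filter to keep only duplicates
--     duplicates = {
--         start_time: {"missing_data": -1, "row": None}
--         for start_time, occurrences in count_occurrences.items()
--         if occurrences > 1
--     }
--
--     # find the row indices with duplicates with the fewest missing data points
--     duplicates_tracker = {}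
--     row_num = 0
--     for row in data:
--         if row[0] in duplicates:
--             missing_data = len([True for value in row if not value is None])
--             if row[0] in duplicates_tracker.keys():
--                 if duplicates_tracker[row[0]]["missing_data"] > missing_data:
--                     duplicates_tracker[row[0]]["missing_data"] = missing_data
--                     duplicates_tracker[row[0]]["row"] = row_num
--             else:
--                 duplicates_tracker[row[0]] = {
--                     "missing_data": missing_data,
--                     "row": row_num,
--                 }
--
--         row_num += 1
--
--     # collect the richest rows from the duplicate data
--     rich_data = []
--     for _, info in duplicates_tracker.items():
--         rich_data.append(data[info["row"]])
--
--     # consolidate the rest of the data that were not duplicates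
--     non_duplicates = set(start_times) - set(duplicates.keys())
--     for row in data:
--         if row[0] in non_duplicates:
--             rich_data.append(row)
--     return rich_data
-- ===== SOURCE B (Python) =====
-- def _keep_richest_duplicates(data: list[tuple]) -> list[tuple]:
--     # One pass groups rows by key in first-occurrence order, then one pass over
--     # the groups partitions into duplicate winners and singletons.
--     groups = {}
--     for row in data:
--         groups.setdefault(row[0], []).append(row)
--     winners = []
--     singles = []
--     for rows in groups.values():
--         if len(rows) > 1:
--             winners.append(min(rows, key=lambda r: sum(1 for v in r if v is not None)))
--         else:
--             singles.append(rows[0])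
--     return winners + singles
-- ===== Notes on version B (the rewrite author's own statement) =====
-- stated objective: simpler
-- what changed: B replaces A's Counter + duplicates dict + index tracker + set difference + three output passes by one grouping pass into an order-preserving dict of key -> rows and one pass over the groups that picks min(group, key=non-None count) for duplicate keys and the single row otherwise.
import Mathlib
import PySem

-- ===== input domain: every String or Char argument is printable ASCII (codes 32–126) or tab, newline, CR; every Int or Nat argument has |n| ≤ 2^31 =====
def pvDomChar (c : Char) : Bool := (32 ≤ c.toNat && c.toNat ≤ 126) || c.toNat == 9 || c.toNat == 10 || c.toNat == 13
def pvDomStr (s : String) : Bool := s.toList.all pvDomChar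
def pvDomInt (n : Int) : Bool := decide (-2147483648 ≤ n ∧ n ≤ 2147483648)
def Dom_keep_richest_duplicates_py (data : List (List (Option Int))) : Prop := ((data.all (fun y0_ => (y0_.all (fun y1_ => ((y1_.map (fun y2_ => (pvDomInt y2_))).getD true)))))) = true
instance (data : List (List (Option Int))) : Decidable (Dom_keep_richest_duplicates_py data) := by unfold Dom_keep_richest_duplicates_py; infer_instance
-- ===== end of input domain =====

-- B re-implements the dedupe as one grouping pass over an order-preserving dict plus one pass over the
-- groups (objective: simpler — it drops the Counter, the duplicates dict, the tracker and the set difference).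

-- ===== PORT A =====

-- row[0] : the row's key (IndexError on an empty row is excluded by Pre_; the getD branch is unreachable there)
def rowKey (r : List (Option Int)) : Option Int := (PySem.List.pyGet? r 0).getD none

-- len([True for value in row if not value is None])
def missingA (r : List (Option Int)) : Int := ((r.filter (fun v => !(v == none))).length : Int)

def keep_richest_duplicates_py (data : List (List (Option Int))) : List (List (Option Int)) :=
  -- start_times = [row[0] for row in data]
  let start_times := data.map rowKey
  -- count_occurrences = dict(Counter(start_times))
  let count_occurrences := PySem.Dict.counter start_times
  -- duplicates = {st: {"missing_data": -1, "row": None} for st, occ in … if occ > 1}  (value modelled as the pair (-1, none))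
  let duplicates : PySem.Dict (Option Int) (Int × Option Int) :=
    count_occurrences.items.foldl
      (fun d p => if p.2 > 1 then d.insert p.1 ((-1 : Int), (none : Option Int)) else d)
      PySem.Dict.empty
  -- tracker loop over data with running row_num; value = (missing_data, row index)
  -- (tracker[row[0]] is read with getD: the key is present — the read is guarded by the contains test)
  let tr :=
    data.foldl
      (fun (s : PySem.Dict (Option Int) (Int × Int) × Int) row =>
        ( if duplicates.contains (rowKey row) then
            let missing := missingA row
            if s.1.contains (rowKey row) then
              if (s.1.getD (rowKey row) (0, 0)).1 > missing then
                s.1.insert (rowKey row) (missing, s.2)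
              else s.1
            else s.1.insert (rowKey row) (missing, s.2)
          else s.1,
          s.2 + 1))
      (PySem.Dict.empty, (0 : Int))
  -- rich_data = [data[info["row"]] for _, info in tracker.items()]  (index always in range; getD branch unreachable)
  let rich_data :=
    tr.1.items.foldl (fun acc p => acc ++ [(PySem.List.pyGet? data p.2.2).getD []]) []
  -- non_duplicates = set(start_times) - set(duplicates.keys())
  let non_duplicates := PySem.Set.diff (PySem.Set.ofList start_times) (PySem.Set.ofList duplicates.keys)
  -- for row in data: if row[0] in non_duplicates: rich_data.append(row)
  data.foldl (fun acc row => if non_duplicates.contains (rowKey row) then acc ++ [row] else acc) rich_data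

-- ===== PORT B =====

-- sum(1 for v in row if v is not None)
def nonNoneSum (r : List (Option Int)) : Int := ((r.filter (fun v => !(v == none))).map (fun _ => (1 : Int))).sum

def keep_richest_duplicates_py_alt (data : List (List (Option Int))) : List (List (Option Int)) :=
  -- groups.setdefault(row[0], []).append(row)
  let groups : PySem.Dict (Option Int) (List (List (Option Int))) :=
    data.foldl (fun g row => g.modify (rowKey row) [] (fun l => l ++ [row])) PySem.Dict.empty
  -- one pass over the group lists, partitioning into duplicate winners and singletons
  -- (min over a nonempty group and rows[0] of a nonempty group: the getD branches are unreachable)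
  let ws :=
    groups.values.foldl
      (fun (s : List (List (Option Int)) × List (List (Option Int))) rows =>
        if rows.length > 1 then
          (s.1 ++ [(PySem.List.min? rows nonNoneSum).getD []], s.2)
        else
          (s.1, s.2 ++ [(PySem.List.pyGet? rows 0).getD []]))
      ([], [])
  ws.1 ++ ws.2

-- ===== PRECONDITION & SPEC =====
-- Pre_ excludes inputs containing an empty row: there row[0] raises IndexError in A (and in B alike).
def Pre_keep_richest_duplicates_py (data : List (List (Option Int))) : Prop := ∀ r ∈ data, r ≠ []
instance (data : List (List (Option Int))) : Decidable (Pre_keep_richest_duplicates_py data) := by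
  unfold Pre_keep_richest_duplicates_py; infer_instance

def pvWitness_keep_richest_duplicates_py : List (List (Option Int)) :=
  [[some 1, none], [some 2, some 3], [some 1, some 4]]

def Spec_keep_richest_duplicates_py (data : List (List (Option Int))) (out : List (List (Option Int))) : Prop := out = keep_richest_duplicates_py_alt data
instance (data : List (List (Option Int))) (out : List (List (Option Int))) : Decidable (Spec_keep_richest_duplicates_py data out) := by unfold Spec_keep_richest_duplicates_py; infer_instance

-- ===== CLAIM (what is proved, stated in full; the proofs are below) =====
def Claim_equal_keep_richest_duplicates_py : Prop := ∀ (data : List (List (Option Int))), Dom_keep_richest_duplicates_py data → Pre_keep_richest_duplicates_py data → Spec_keep_richest_duplicates_py data (keep_richest_duplicates_py data)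

-- ===== LEMMAS AND PROOFS =====

-- Abbreviations used only by the proofs
def ks (data : List (List (Option Int))) : List (Option Int) := data.map rowKey
def grp (data : List (List (Option Int))) (x : Option Int) : List (List (Option Int)) :=
  data.filter (fun r => rowKey r == x)
-- Bool test "x occurs more than once among the keys"
def qdup (data : List (List (Option Int))) (x : Option Int) : Bool := decide (1 < (ks data).count x)

-- the value the tracker holds for key x after processing prefix pre: first minimal (missingA, index)
def trackVal (pre : List (List (Option Int))) (x : Option Int) : Int × Int :=
  match PySem.List.min? ((pre.zipIdx).filter (fun p => rowKey p.1 == x)) (fun p => missingA p.1) with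
  | some p => (missingA p.1, (p.2 : Int))
  | none => (0, 0)

-- canonical form of the tracker dict after processing prefix pre, with q the duplicate test
def trackDict (q : Option Int → Bool) (pre : List (List (Option Int))) :
    PySem.Dict (Option Int) (Int × Int) :=
  PySem.Dict.mk (((PySem.Set.ofList (ks pre)).filter q).map (fun x => (x, trackVal pre x)))

-- find? on a canonical items list
theorem find?_map_pair {α : Type} (f : Option Int → α) (ys : List (Option Int)) (x : Option Int) :
    (ys.map (fun y => (y, f y))).find? (fun p => p.1 == x)
      = (ys.find? (fun y => y == x)).map (fun y => (y, f y)) := by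
  induction ys with
  | nil => rfl
  | cons a t ih =>
    by_cases h : a = x
    · subst h; simp [List.find?]
    · have hb : (a == x) = false := by simp [h]
      simp only [List.map_cons, List.find?, hb]
      exact ih

theorem find?_beq_self {x : Option Int} {ys : List (Option Int)} (h : x ∈ ys) :
    ys.find? (fun y => y == x) = some x := by
  induction ys with
  | nil => cases h
  | cons a t ih =>
    by_cases ha : a = x
    · subst ha; simp [List.find?]
    · have hx : x ∈ t := by
        rcases List.mem_cons.mp h with h1 | h1
        · exact absurd h1.symm ha
        · exact h1
      rw [List.find?_cons_of_neg (by simp [ha]), ih hx]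

theorem find?_beq_none {x : Option Int} {ys : List (Option Int)} (h : x ∉ ys) :
    ys.find? (fun y => y == x) = none := by
  rw [List.find?_eq_none]
  intro y hy
  simp only [beq_iff_eq]
  rintro rfl; exact h hy

-- min? over an appended element = one more step
theorem min?_append_singleton {α κ : Type} [LinearOrder κ] (l : List α) (e : α) (key : α → κ) :
    PySem.List.min? (l ++ [e]) key =
      match PySem.List.min? l key with
      | none => some e
      | some m => if key e < key m then some e else some m := by
  simp only [PySem.List.min?, List.foldl_append, List.foldl_cons, List.foldl_nil]
  rfl

-- min? commutes with map
theorem min?_map {α β κ : Type} [LinearOrder κ] (f : α → β) (l : List α) (key : β → κ) :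
    PySem.List.min? (l.map f) key = (PySem.List.min? l (fun a => key (f a))).map f := by
  suffices h : ∀ (acc : Option α),
      List.foldl (fun acc b => match acc with
        | none => some b
        | some m => if key b < key m then some b else some m) (acc.map f) (l.map f)
      = (List.foldl (fun acc a => match acc with
        | none => some a
        | some m => if key (f a) < key (f m) then some a else some m) acc l).map f by
    simpa [PySem.List.min?] using h none
  induction l with
  | nil => intro acc; rfl
  | cons a t ih =>
    intro acc
    simp only [List.map_cons, List.foldl_cons]
    cases acc with
    | none => exact ih (some a)
    | some m =>
      simp only [Option.map_some]
      by_cases hk : key (f a) < key (f m)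
      · simp only [hk, if_pos]
        exact ih (some a)
      · simp only [hk, if_neg, not_false_iff]
        exact ih (some m)

theorem canon_get?_mem {α : Type} {f : Option Int → α} {ys : List (Option Int)} {x : Option Int}
    (h : x ∈ ys) :
    (PySem.Dict.mk (ys.map (fun y => (y, f y)))).get? x = some (f x) := by
  show Option.map (fun p => p.2)
    ((ys.map (fun y => (y, f y))).find? (fun p => p.1 == x)) = some (f x)
  rw [find?_map_pair, find?_beq_self h]
  rfl

theorem canon_contains {α : Type} (f : Option Int → α) (ys : List (Option Int)) (x : Option Int) :
    (PySem.Dict.mk (ys.map (fun y => (y, f y)))).contains x = decide (x ∈ ys) := by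
  show (ys.map (fun y => (y, f y))).any (fun p => p.1 == x) = decide (x ∈ ys)
  rw [List.any_map]
  by_cases hx : x ∈ ys
  · simp only [hx, decide_true]
    rw [List.any_eq_true]
    exact ⟨x, hx, by simp⟩
  · simp only [hx, decide_false]
    rw [List.any_eq_false]
    intro y hy
    simp only [Function.comp_def, beq_iff_eq]
    rintro rfl; exact hx hy

theorem set_add_mem {s : List (Option Int)} {x : Option Int} (h : x ∈ s) :
    PySem.Set.add s x = s := by
  simp [PySem.Set.add, PySem.Set.contains, h]

theorem set_add_not_mem {s : List (Option Int)} {x : Option Int} (h : x ∉ s) :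
    PySem.Set.add s x = s ++ [x] := by
  simp [PySem.Set.add, PySem.Set.contains, h]

theorem mapFst_zipIdx (l : List (List (Option Int))) :
    ∀ n, (l.zipIdx n).map Prod.fst = l := by
  induction l with
  | nil => intro n; rfl
  | cons a t ih => intro n; simp [List.zipIdx_cons, ih]

theorem mapFst_zip_filter (pre : List (List (Option Int))) (x : Option Int) :
    ((pre.zipIdx).filter (fun p => rowKey p.1 == x)).map Prod.fst = grp pre x := by
  have h1 : (fun p : List (Option Int) × Nat => rowKey p.1 == x)
      = (fun r => rowKey r == x) ∘ Prod.fst := rfl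
  rw [h1, ← List.filter_map, mapFst_zipIdx pre 0]
  rfl

theorem grp_eq_nil_iff {pre : List (List (Option Int))} {x : Option Int} :
    grp pre x = [] ↔ x ∉ ks pre := by
  unfold grp ks
  rw [List.filter_eq_nil_iff]
  simp

theorem trackVal_ne (pre : List (List (Option Int))) (row : List (Option Int)) {x : Option Int}
    (hx : x ≠ rowKey row) : trackVal (pre ++ [row]) x = trackVal pre x := by
  unfold trackVal
  rw [List.zipIdx_append, List.filter_append]
  have h2 : List.filter (fun p => rowKey p.1 == x) ([row].zipIdx (0 + pre.length)) = [] := by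
    simp [List.zipIdx, Ne.symm hx]
  rw [h2, List.append_nil]

theorem canon_get?_not_mem {α : Type} {f : Option Int → α} {ys : List (Option Int)} {x : Option Int}
    (h : x ∉ ys) :
    (PySem.Dict.mk (ys.map (fun y => (y, f y)))).get? x = none := by
  show Option.map (fun p => p.2)
    ((ys.map (fun y => (y, f y))).find? (fun p => p.1 == x)) = none
  rw [find?_map_pair, find?_beq_none h]
  rfl

theorem grp_append_ne (pre : List (List (Option Int))) (row : List (Option Int)) {x : Option Int}
    (hx : x ≠ rowKey row) : grp (pre ++ [row]) x = grp pre x := by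
  unfold grp; rw [List.filter_append]; simp [Ne.symm hx]

theorem grp_append_self (pre : List (List (Option Int))) (row : List (Option Int)) :
    grp (pre ++ [row]) (rowKey row) = grp pre (rowKey row) ++ [row] := by
  unfold grp; rw [List.filter_append]; simp

theorem grp_cons_ne {t : List (List (Option Int))} {r : List (Option Int)} {x : Option Int}
    (hx : x ≠ rowKey r) : grp (r :: t) x = grp t x := by
  unfold grp; rw [List.filter_cons]; simp [Ne.symm hx]

theorem trackVal_key (pre : List (List (Option Int))) (row : List (Option Int)) :
    trackVal (pre ++ [row]) (rowKey row)
      = match PySem.List.min? ((pre.zipIdx).filter (fun p => rowKey p.1 == rowKey row))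
              (fun p => missingA p.1) with
        | none => (missingA row, (pre.length : Int))
        | some p => if missingA row < missingA p.1 then (missingA row, (pre.length : Int))
                    else (missingA p.1, (p.2 : Int)) := by
  unfold trackVal
  rw [List.zipIdx_append, List.filter_append]
  have h2 : List.filter (fun p => rowKey p.1 == rowKey row) ([row].zipIdx (0 + pre.length))
      = [(row, pre.length)] := by
    simp [List.zipIdx]
  rw [h2, min?_append_singleton]
  cases hmin : PySem.List.min? ((pre.zipIdx).filter (fun p => rowKey p.1 == rowKey row))
      (fun p => missingA p.1) with
  | none => rfl
  | some p =>
    by_cases hlt : missingA row < missingA p.1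
    · simp [hlt]
    · simp [hlt]

-- canonical form of B's groups dict
def grpDict (pre : List (List (Option Int))) : PySem.Dict (Option Int) (List (List (Option Int))) :=
  PySem.Dict.mk ((PySem.Set.ofList (ks pre)).map (fun x => (x, grp pre x)))

theorem grpDict_step (pre : List (List (Option Int))) (row : List (Option Int)) :
    (grpDict pre).modify (rowKey row) [] (fun l => l ++ [row]) = grpDict (pre ++ [row]) := by
  unfold PySem.Dict.modify
  have hkeys : ks (pre ++ [row]) = ks pre ++ [rowKey row] := by simp [ks, rowKey]
  by_cases hm : rowKey row ∈ PySem.Set.ofList (ks pre)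
  · have hcon : (grpDict pre).contains (rowKey row) = true := by
      unfold grpDict; rw [canon_contains]; simpa using hm
    have hget : (grpDict pre).getD (rowKey row) [] = grp pre (rowKey row) := by
      unfold grpDict PySem.Dict.getD; rw [canon_get?_mem hm]; rfl
    rw [hget]
    apply PySem.Dict.ext
    rw [PySem.Dict.items_insert_of_contains _ _ hcon]
    unfold grpDict
    rw [hkeys, PySem.Set.ofList_append_singleton, set_add_mem hm, List.map_map]
    apply List.map_congr_left
    intro x hxm
    by_cases hxx : x = rowKey row
    · subst hxx; simp [grp_append_self]
    · simp [hxx, grp_append_ne pre row hxx]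
  · have hcon : (grpDict pre).contains (rowKey row) = false := by
      unfold grpDict; rw [canon_contains]; simpa using hm
    have hget : (grpDict pre).getD (rowKey row) [] = [] := by
      unfold grpDict PySem.Dict.getD; rw [canon_get?_not_mem hm]; rfl
    rw [hget]
    apply PySem.Dict.ext
    rw [PySem.Dict.items_insert_of_not_contains _ _ hcon]
    unfold grpDict
    rw [hkeys, PySem.Set.ofList_append_singleton, set_add_not_mem hm, List.map_append]
    congr 1
    · apply List.map_congr_left
      intro x hxm
      have hx : x ≠ rowKey row := fun e => hm (e ▸ hxm)
      rw [grp_append_ne pre row hx]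
    · have hnil : grp pre (rowKey row) = [] :=
        grp_eq_nil_iff.mpr (fun h => hm ((PySem.Set.mem_ofList _ _).mpr h))
      simp [grp_append_self, hnil]

theorem grpDict_fold (data : List (List (Option Int))) :
    data.foldl (fun g row => g.modify (rowKey row) [] (fun l => l ++ [row])) PySem.Dict.empty
      = grpDict data := by
  suffices h : ∀ (l pre : List (List (Option Int))),
      l.foldl (fun g row => g.modify (rowKey row) [] (fun l => l ++ [row])) (grpDict pre)
        = grpDict (pre ++ l) by
    have h0 := h data []
    rw [List.nil_append] at h0
    have e1 : grpDict [] = PySem.Dict.empty := rfl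
    rw [e1] at h0
    exact h0
  intro l
  induction l with
  | nil => intro pre; simp
  | cons row t ih =>
    intro pre
    rw [List.foldl_cons, grpDict_step pre row, ih (pre ++ [row])]
    simp

-- the one-step lemma for the tracker fold
theorem trackDict_step (q : Option Int → Bool) (pre : List (List (Option Int)))
    (row : List (Option Int)) :
    ( if q (rowKey row) then
        if (trackDict q pre).contains (rowKey row) then
          if ((trackDict q pre).getD (rowKey row) (0, 0)).1 > missingA row then
            (trackDict q pre).insert (rowKey row) (missingA row, (pre.length : Int))
          else trackDict q pre
        else (trackDict q pre).insert (rowKey row) (missingA row, (pre.length : Int))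
      else trackDict q pre)
      = trackDict q (pre ++ [row]) := by
  have hkeys : ks (pre ++ [row]) = ks pre ++ [rowKey row] := by simp [ks, rowKey]
  by_cases hq : q (rowKey row) = true
  · rw [if_pos hq]
    by_cases hm : rowKey row ∈ PySem.Set.ofList (ks pre)
    · have hmemf : rowKey row ∈ (PySem.Set.ofList (ks pre)).filter q :=
        List.mem_filter.mpr ⟨hm, hq⟩
      have hcon : (trackDict q pre).contains (rowKey row) = true := by
        unfold trackDict; rw [canon_contains]; simpa using hmemf
      have hgne : ¬ ((pre.zipIdx).filter (fun p => rowKey p.1 == rowKey row)) = [] := by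
        intro hnil
        have hg : grp pre (rowKey row) = [] := by
          rw [← mapFst_zip_filter, hnil]; rfl
        exact (grp_eq_nil_iff.mp hg) ((PySem.Set.mem_ofList _ _).mp hm)
      obtain ⟨p, hp⟩ : ∃ p, PySem.List.min?
          ((pre.zipIdx).filter (fun p => rowKey p.1 == rowKey row)) (fun p => missingA p.1)
          = some p := by
        cases hmin : PySem.List.min?
            ((pre.zipIdx).filter (fun p => rowKey p.1 == rowKey row)) (fun p => missingA p.1) with
        | none => exact absurd ((PySem.List.min?_eq_none_iff _ _).mp hmin) hgne
        | some p => exact ⟨p, rfl⟩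
      have hval : trackVal pre (rowKey row) = (missingA p.1, (p.2 : Int)) := by
        unfold trackVal; rw [hp]
      have hvalnew : trackVal (pre ++ [row]) (rowKey row)
          = if missingA row < missingA p.1 then (missingA row, (pre.length : Int))
            else (missingA p.1, (p.2 : Int)) := by
        rw [trackVal_key, hp]
      have hgetD : (trackDict q pre).getD (rowKey row) (0, 0) = (missingA p.1, (p.2 : Int)) := by
        unfold trackDict PySem.Dict.getD
        rw [canon_get?_mem hmemf, ← hval]; rfl
      rw [if_pos hcon, hgetD]
      by_cases hgt : (missingA p.1, (p.2 : Int)).1 > missingA row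
      · rw [if_pos hgt]
        apply PySem.Dict.ext
        rw [PySem.Dict.items_insert_of_contains _ _ hcon]
        unfold trackDict
        rw [hkeys, PySem.Set.ofList_append_singleton, set_add_mem hm, List.map_map]
        apply List.map_congr_left
        intro x hxm
        by_cases hxx : x = rowKey row
        · subst hxx
          have hlt : missingA row < missingA p.1 := hgt
          simp [hvalnew, hlt]
        · simp [hxx, trackVal_ne pre row hxx]
      · rw [if_neg hgt]
        apply PySem.Dict.ext
        unfold trackDict
        rw [hkeys, PySem.Set.ofList_append_singleton, set_add_mem hm]
        apply List.map_congr_left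
        intro x hxm
        by_cases hxx : x = rowKey row
        · subst hxx
          have hlt : ¬ missingA row < missingA p.1 := hgt
          rw [hvalnew, if_neg hlt, hval]
        · rw [trackVal_ne pre row hxx]
    · have hnmf : rowKey row ∉ (PySem.Set.ofList (ks pre)).filter q :=
        fun h => hm (List.mem_filter.mp h).1
      have hcon : (trackDict q pre).contains (rowKey row) = false := by
        unfold trackDict; rw [canon_contains]; simpa using hnmf
      rw [if_neg (by simp [hcon])]
      apply PySem.Dict.ext
      rw [PySem.Dict.items_insert_of_not_contains _ _ hcon]
      unfold trackDict
      rw [hkeys, PySem.Set.ofList_append_singleton, set_add_not_mem hm, List.filter_append]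
      have hq1 : List.filter q [rowKey row] = [rowKey row] := by simp [hq]
      rw [hq1, List.map_append]
      congr 1
      · apply List.map_congr_left
        intro x hxm
        have hx : x ≠ rowKey row := by
          intro e; subst e; exact hm (List.mem_filter.mp hxm).1
        rw [trackVal_ne pre row hx]
      · have hgnil : ((pre.zipIdx).filter (fun p => rowKey p.1 == rowKey row)) = [] := by
          have hg : grp pre (rowKey row) = [] :=
            grp_eq_nil_iff.mpr (fun h => hm ((PySem.Set.mem_ofList _ _).mpr h))
          have h2 := mapFst_zip_filter pre (rowKey row)
          rw [hg] at h2
          exact List.map_eq_nil_iff.mp h2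
        simp only [List.map_cons, List.map_nil]
        rw [trackVal_key pre row, hgnil]
        rfl
  · rw [if_neg hq]
    apply PySem.Dict.ext
    unfold trackDict
    rw [hkeys, PySem.Set.ofList_append_singleton]
    by_cases hm : rowKey row ∈ PySem.Set.ofList (ks pre)
    · rw [set_add_mem hm]
      apply List.map_congr_left
      intro x hxm
      have hqx := (List.mem_filter.mp hxm).2
      have hx : x ≠ rowKey row := fun e => hq (e ▸ hqx)
      rw [trackVal_ne pre row hx]
    · rw [set_add_not_mem hm, List.filter_append]
      have h1 : List.filter q [rowKey row] = [] := by simp [hq]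
      rw [h1, List.append_nil]
      apply List.map_congr_left
      intro x hxm
      have hqx := (List.mem_filter.mp hxm).2
      have hx : x ≠ rowKey row := fun e => hq (e ▸ hqx)
      rw [trackVal_ne pre row hx]

-- the whole tracker fold in canonical form
theorem trackDict_fold (q : Option Int → Bool) (data : List (List (Option Int))) :
    (data.foldl
      (fun (s : PySem.Dict (Option Int) (Int × Int) × Int) row =>
        ( if q (rowKey row) then
            if s.1.contains (rowKey row) then
              if (s.1.getD (rowKey row) (0, 0)).1 > missingA row then
                s.1.insert (rowKey row) (missingA row, s.2)
              else s.1
            else s.1.insert (rowKey row) (missingA row, s.2)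
          else s.1,
          s.2 + 1))
      (PySem.Dict.empty, (0 : Int))).1 = trackDict q data := by
  suffices h : ∀ (l pre : List (List (Option Int))),
      l.foldl
        (fun (s : PySem.Dict (Option Int) (Int × Int) × Int) row =>
          ( if q (rowKey row) then
              if s.1.contains (rowKey row) then
                if (s.1.getD (rowKey row) (0, 0)).1 > missingA row then
                  s.1.insert (rowKey row) (missingA row, s.2)
                else s.1
              else s.1.insert (rowKey row) (missingA row, s.2)
            else s.1,
            s.2 + 1))
        (trackDict q pre, (pre.length : Int))
      = (trackDict q (pre ++ l), ((pre ++ l).length : Int)) by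
    have h0 := h data []
    rw [List.nil_append] at h0
    have e1 : trackDict q [] = PySem.Dict.empty := rfl
    rw [e1] at h0
    have e2 : ((([] : List (List (Option Int))).length : Int)) = (0 : Int) := rfl
    rw [e2] at h0
    rw [h0]
  intro l
  induction l with
  | nil => intro pre; simp
  | cons row t ih =>
    intro pre
    rw [List.foldl_cons]
    dsimp only
    have hstep :
        (( if q (rowKey row) then
              if (trackDict q pre).contains (rowKey row) then
                if ((trackDict q pre).getD (rowKey row) (0, 0)).1 > missingA row then
                  (trackDict q pre).insert (rowKey row) (missingA row, (pre.length : Int))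
                else trackDict q pre
              else (trackDict q pre).insert (rowKey row) (missingA row, (pre.length : Int))
            else trackDict q pre,
            (pre.length : Int) + 1) :
            PySem.Dict (Option Int) (Int × Int) × Int)
        = (trackDict q (pre ++ [row]), ((pre ++ [row]).length : Int)) := by
      refine Prod.ext ?_ ?_
      · exact trackDict_step q pre row
      · simp
    rw [hstep, ih (pre ++ [row])]
    simp

theorem any_beq_eq_decide_mem (ys : List (Option Int)) (x : Option Int) :
    (ys.any (fun y => y == x)) = decide (x ∈ ys) := by
  by_cases hx : x ∈ ys
  · simp only [hx, decide_true]
    rw [List.any_eq_true]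
    exact ⟨x, hx, by simp⟩
  · simp only [hx, decide_false]
    rw [List.any_eq_false]
    intro y hy
    simp only [beq_iff_eq]
    rintro rfl; exact hx hy

theorem grp_length (data : List (List (Option Int))) (x : Option Int) :
    (grp data x).length = (ks data).count x := by
  unfold grp ks
  rw [List.count_eq_countP, List.countP_map, ← List.countP_eq_length_filter]
  rfl

-- the duplicates dict of port A in closed form
theorem duplicates_items (data : List (List (Option Int))) :
    ((PySem.Dict.counter (ks data)).items.foldl
      (fun d p => if p.2 > 1 then d.insert p.1 ((-1 : Int), (none : Option Int)) else d)
      PySem.Dict.empty).items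
    = ((PySem.Set.ofList (ks data)).filter (qdup data)).map
        (fun x => (x, ((-1 : Int), (none : Option Int)))) := by
  have hflt : List.filter ((fun p : Option Int × Int => decide (p.2 > 1)) ∘
        (fun k => (k, (List.count k (ks data) : Int)))) (PySem.Set.ofList (ks data))
      = (PySem.Set.ofList (ks data)).filter (qdup data) := by
    apply List.filter_congr
    intro x _
    simp [qdup, Nat.one_lt_cast]
  rw [PySem.Dict.items_counter, PySem.List.foldl_ite_eq_foldl_filter, List.filter_map, hflt]
  rw [PySem.Dict.items_foldl_insert_fresh
      (((PySem.Set.ofList (ks data)).filter (qdup data)).map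
        (fun k => (k, (List.count k (ks data) : Int))))
      Prod.fst (fun _ => ((-1 : Int), (none : Option Int))) PySem.Dict.empty
      (fun a _ => rfl)
      (by
        rw [List.map_map]
        simpa [Function.comp_def] using
          List.Nodup.filter (qdup data) (PySem.Set.nodup_ofList (ks data)))]
  rw [List.map_map]
  rfl

-- B's partition fold, split into its two accumulators
theorem pairfold (vals : List (List (List (Option Int)))) :
    vals.foldl
      (fun (s : List (List (Option Int)) × List (List (Option Int))) rows =>
        if rows.length > 1 then
          (s.1 ++ [(PySem.List.min? rows nonNoneSum).getD []], s.2)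
        else
          (s.1, s.2 ++ [(PySem.List.pyGet? rows 0).getD []]))
      ([], [])
    = ((vals.filter (fun rows => decide (rows.length > 1))).map
          (fun rows => (PySem.List.min? rows nonNoneSum).getD []),
       (vals.filter (fun rows => !decide (rows.length > 1))).map
          (fun rows => (PySem.List.pyGet? rows 0).getD [])) := by
  rw [PySem.List.foldl_congr_mem vals _
      (fun (s : List (List (Option Int)) × List (List (Option Int))) rows =>
        (if rows.length > 1 then
            s.1 ++ [(PySem.List.min? rows nonNoneSum).getD []] else s.1,
         if ¬ rows.length > 1 then
            s.2 ++ [(PySem.List.pyGet? rows 0).getD []] else s.2))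
      ([], [])
      (by
        intro s rows _
        by_cases h : rows.length > 1 <;> simp [h])]
  rw [PySem.List.foldl_prod_mk
      (f := fun s1 rows => if rows.length > 1 then
          s1 ++ [(PySem.List.min? rows nonNoneSum).getD []] else s1)
      (g := fun s2 rows => if ¬ rows.length > 1 then
          s2 ++ [(PySem.List.pyGet? rows 0).getD []] else s2)]
  refine Prod.ext ?_ ?_
  · simpa using PySem.List.foldl_append_ite
      (fun rows : List (List (Option Int)) => rows.length > 1)
      (fun rows => (PySem.List.min? rows nonNoneSum).getD []) vals []
  · have h2 := PySem.List.foldl_append_ite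
      (fun rows : List (List (Option Int)) => ¬ rows.length > 1)
      (fun rows => (PySem.List.pyGet? rows 0).getD []) vals []
    simp only [List.nil_append] at h2 ⊢
    rw [h2]
    congr 1
    apply List.filter_congr
    intro rows _
    by_cases h : 1 < rows.length
    · simp [h]
    · simp [h]

-- the singleton block: mapping each non-duplicated key to its unique row is a filter of data
theorem singles_map (data : List (List (Option Int))) (qn : Option Int → Bool)
    (h : ∀ x, qn x = true → (ks data).count x ≤ 1) :
    ((PySem.Set.ofList (ks data)).filter qn).map
        (fun x => (PySem.List.pyGet? (grp data x) 0).getD [])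
    = data.filter (fun r => qn (rowKey r)) := by
  induction data with
  | nil => rfl
  | cons r t ih =>
    have hks : ks (r :: t) = rowKey r :: ks t := rfl
    have hsub : ∀ x, qn x = true → (ks t).count x ≤ 1 := by
      intro x hx
      have h1 := h x hx
      rw [hks, List.count_cons] at h1
      split at h1 <;> omega
    by_cases hqy : qn (rowKey r) = true
    · have hcnt := h _ hqy
      rw [hks, List.count_cons_self] at hcnt
      have hnot : rowKey r ∉ ks t := by
        rw [← List.count_eq_zero]; omega
      rw [hks, PySem.Set.ofList_cons]
      have hdisc : (PySem.Set.ofList (ks t)).discard (rowKey r) = PySem.Set.ofList (ks t) := by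
        unfold PySem.Set.discard
        apply List.filter_eq_self.mpr
        intro y hy
        have hym : y ∈ ks t := (PySem.Set.mem_ofList _ _).mp hy
        simp only [Bool.not_eq_true', beq_eq_false_iff_ne, ne_eq]
        intro e; exact hnot (e ▸ hym)
      rw [hdisc, List.filter_cons_of_pos hqy, List.map_cons]
      have hgrp : grp (r :: t) (rowKey r) = [r] := by
        have hnil : grp t (rowKey r) = [] := grp_eq_nil_iff.mpr hnot
        unfold grp at hnil ⊢
        rw [List.filter_cons_of_pos (by simp), hnil]
      rw [hgrp, List.filter_cons_of_pos (p := fun r' => qn (rowKey r')) (l := t) hqy]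
      congr 1
      rw [← ih hsub]
      apply List.map_congr_left
      intro x hx
      have hxm : x ∈ ks t := (PySem.Set.mem_ofList _ _).mp (List.mem_filter.mp hx).1
      have hxne : x ≠ rowKey r := fun e => hnot (e ▸ hxm)
      rw [grp_cons_ne hxne]
    · have hqy' : qn (rowKey r) = false := by
        cases hb : qn (rowKey r) with
        | true => exact absurd hb hqy
        | false => rfl
      rw [hks, PySem.Set.ofList_cons, List.filter_cons_of_neg (by simp [hqy'])]
      have hdf : ((PySem.Set.ofList (ks t)).discard (rowKey r)).filter qn
          = (PySem.Set.ofList (ks t)).filter qn := by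
        unfold PySem.Set.discard
        rw [List.filter_filter]
        apply List.filter_congr
        intro y _
        cases hb : qn y with
        | false => simp
        | true =>
          have hne : y ≠ rowKey r := by
            intro e; rw [e, hqy'] at hb; exact Bool.false_ne_true hb
          simp [hne]
      rw [hdf]
      have hmapc : ((PySem.Set.ofList (ks t)).filter qn).map
          (fun x => (PySem.List.pyGet? (grp (r :: t) x) 0).getD [])
          = ((PySem.Set.ofList (ks t)).filter qn).map
          (fun x => (PySem.List.pyGet? (grp t x) 0).getD []) := by
        apply List.map_congr_left
        intro x hx
        have hqx := (List.mem_filter.mp hx).2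
        have hxne : x ≠ rowKey r := by
          intro e; rw [e, hqy'] at hqx; exact Bool.false_ne_true hqx
        rw [grp_cons_ne hxne]
      rw [hmapc, ih hsub,
        List.filter_cons_of_neg (p := fun r' => qn (rowKey r')) (l := t) (by simp [hqy'])]

theorem nonNoneSum_eq : nonNoneSum = missingA := by
  funext r
  unfold nonNoneSum missingA
  induction r.filter (fun v => !(v == none)) with
  | nil => rfl
  | cons a t _ => simp; omega

theorem contains_eq_decide_mem (ys : List (Option Int)) (x : Option Int) :
    ys.contains x = decide (x ∈ ys) := by
  induction ys with
  | nil => rfl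
  | cons a t ih =>
    show ((x == a) || t.contains x) = _
    rw [ih]
    by_cases h : x = a
    · simp [h]
    · simp [h]

-- the tracked index of key x points at the first row of its group with minimal missingA
theorem winner_val (data : List (List (Option Int))) (x : Option Int) (hx : x ∈ ks data) :
    (PySem.List.pyGet? data ((trackVal data x).2)).getD []
      = (PySem.List.min? (grp data x) missingA).getD [] := by
  have hgne : ¬ ((data.zipIdx).filter (fun p => rowKey p.1 == x)) = [] := by
    intro hnil
    have hg : grp data x = [] := by rw [← mapFst_zip_filter, hnil]; rfl
    exact (grp_eq_nil_iff.mp hg) hx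
  obtain ⟨p, hp⟩ : ∃ p, PySem.List.min? ((data.zipIdx).filter (fun p => rowKey p.1 == x))
      (fun p => missingA p.1) = some p := by
    cases hmin : PySem.List.min? ((data.zipIdx).filter (fun p => rowKey p.1 == x))
        (fun p => missingA p.1) with
    | none => exact absurd ((PySem.List.min?_eq_none_iff _ _).mp hmin) hgne
    | some p => exact ⟨p, rfl⟩
  have hval : trackVal data x = (missingA p.1, (p.2 : Int)) := by unfold trackVal; rw [hp]
  have hpz : p ∈ data.zipIdx := (List.mem_filter.mp (PySem.List.min?_mem hp)).1
  have hmem := List.mem_zipIdx (x := p.1) (i := p.2) (xs := data) (k := 0) (by simpa using hpz)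
  have hget : PySem.List.pyGet? data ((p.2 : Nat) : Int) = some p.1 := by
    rw [PySem.List.pyGet?_natCast, List.getElem?_eq_some_iff]
    refine ⟨by omega, ?_⟩
    have h3 := hmem.2.2
    simp only [Nat.sub_zero] at h3
    exact h3.symm
  rw [hval]
  show (PySem.List.pyGet? data ((p.2 : Nat) : Int)).getD [] = _
  rw [hget, ← mapFst_zip_filter data x, min?_map Prod.fst _ missingA, hp]
  rfl

-- port A in closed form
theorem portA_eq (data : List (List (Option Int))) :
    keep_richest_duplicates_py data
      = ((PySem.Set.ofList (ks data)).filter (qdup data)).map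
          (fun x => (PySem.List.min? (grp data x) missingA).getD [])
        ++ data.filter (fun r => !qdup data (rowKey r)) := by
  simp only [keep_richest_duplicates_py]
  have hks' : data.map rowKey = ks data := rfl
  rw [hks']
  rw [trackDict_fold (fun y =>
      ((PySem.Dict.counter (ks data)).items.foldl
        (fun d p => if p.2 > 1 then d.insert p.1 ((-1 : Int), (none : Option Int)) else d)
        PySem.Dict.empty).contains y) data]
  rw [PySem.List.foldl_append_singleton_eq_map, PySem.List.foldl_append_if_eq_filter]
  simp only [List.nil_append]
  have hnodup : ((PySem.Set.ofList (ks data)).filter (qdup data)).Nodup :=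
    List.Nodup.filter _ (PySem.Set.nodup_ofList (ks data))
  have hDq : ∀ y, ((PySem.Dict.counter (ks data)).items.foldl
        (fun d p => if p.2 > 1 then d.insert p.1 ((-1 : Int), (none : Option Int)) else d)
        PySem.Dict.empty).contains y
      = decide (y ∈ (PySem.Set.ofList (ks data)).filter (qdup data)) := by
    intro y
    show (((PySem.Dict.counter (ks data)).items.foldl
        (fun d p => if p.2 > 1 then d.insert p.1 ((-1 : Int), (none : Option Int)) else d)
        PySem.Dict.empty).items.any (fun p => p.1 == y)) = _
    rw [duplicates_items data, List.any_map]
    exact any_beq_eq_decide_mem _ y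
  have hkeysD : PySem.Dict.keys
      ((PySem.Dict.counter (ks data)).items.foldl
        (fun d p => if p.2 > 1 then d.insert p.1 ((-1 : Int), (none : Option Int)) else d)
        PySem.Dict.empty)
      = (PySem.Set.ofList (ks data)).filter (qdup data) := by
    show (((PySem.Dict.counter (ks data)).items.foldl
        (fun d p => if p.2 > 1 then d.insert p.1 ((-1 : Int), (none : Option Int)) else d)
        PySem.Dict.empty).items.map (fun p => p.1)) = _
    rw [duplicates_items data, List.map_map]
    simp [Function.comp_def]
  have hTD : trackDict (fun y =>
      ((PySem.Dict.counter (ks data)).items.foldl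
        (fun d p => if p.2 > 1 then d.insert p.1 ((-1 : Int), (none : Option Int)) else d)
        PySem.Dict.empty).contains y) data
      = PySem.Dict.mk (((PySem.Set.ofList (ks data)).filter (qdup data)).map
          (fun x => (x, trackVal data x))) := by
    unfold trackDict
    congr 1
    congr 1
    apply List.filter_congr
    intro y hy
    rw [hDq y]
    by_cases hq : qdup data y = true
    · rw [hq]
      exact decide_eq_true (List.mem_filter.mpr ⟨hy, hq⟩)
    · have hq' : qdup data y = false := by
        cases hb : qdup data y with
        | true => exact absurd hb hq
        | false => rfl
      rw [hq']
      apply decide_eq_false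
      intro hmm
      rw [(List.mem_filter.mp hmm).2] at hq'
      exact Bool.noConfusion hq'
  rw [hTD]
  have hfilt2 : ∀ (dk : List (Option Int)), dk = (PySem.Set.ofList (ks data)).filter (qdup data) →
      data.filter (fun row => (PySem.Set.diff (PySem.Set.ofList (ks data))
          (PySem.Set.ofList dk)).contains (rowKey row))
      = data.filter (fun r => !qdup data (rowKey r)) := by
    intro dk hdk
    subst hdk
    apply List.filter_congr
    intro r hr
    have hmem : rowKey r ∈ ks data := List.mem_map_of_mem hr
    have hSm : rowKey r ∈ PySem.Set.ofList (ks data) := (PySem.Set.mem_ofList _ _).mpr hmem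
    rw [PySem.Set.ofList_eq_self_of_nodup _ hnodup]
    simp only [PySem.Set.diff, PySem.Set.contains, contains_eq_decide_mem]
    by_cases hq : qdup data (rowKey r) = true
    · have hin : rowKey r ∈ (PySem.Set.ofList (ks data)).filter (qdup data) :=
        List.mem_filter.mpr ⟨hSm, hq⟩
      simp [hq]
    · have hq' : qdup data (rowKey r) = false := by
        cases hb : qdup data (rowKey r) with
        | true => exact absurd hb hq
        | false => rfl
      have hnin : rowKey r ∉ (PySem.Set.ofList (ks data)).filter (qdup data) := by
        intro hmm
        rw [(List.mem_filter.mp hmm).2] at hq'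
        exact Bool.noConfusion hq'
      simp [hSm, hq']
  rw [hkeysD, hfilt2 _ rfl]
  congr 1
  dsimp only
  rw [List.map_map]
  apply List.map_congr_left
  intro x hx
  have hxks : x ∈ ks data :=
    (PySem.Set.mem_ofList _ _).mp (List.mem_filter.mp hx).1
  exact winner_val data x hxks

-- port B in closed form
theorem portB_eq (data : List (List (Option Int))) :
    keep_richest_duplicates_py_alt data
      = ((PySem.Set.ofList (ks data)).filter (qdup data)).map
          (fun x => (PySem.List.min? (grp data x) missingA).getD [])
        ++ data.filter (fun r => !qdup data (rowKey r)) := by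
  simp only [keep_richest_duplicates_py_alt]
  rw [grpDict_fold data, pairfold]
  have hq1 : ∀ x, (fun x => !qdup data x) x = true → (ks data).count x ≤ 1 := by
    intro x hx
    simp only [Bool.not_eq_true'] at hx
    unfold qdup at hx
    have := of_decide_eq_false hx
    omega
  have hvals : (grpDict data).values
      = (PySem.Set.ofList (ks data)).map (fun x => grp data x) := by
    unfold grpDict PySem.Dict.values
    rw [List.map_map]
    rfl
  show List.map _ (List.filter _ (grpDict data).values)
      ++ List.map _ (List.filter _ (grpDict data).values) = _
  rw [hvals, List.filter_map, List.filter_map, List.map_map, List.map_map]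
  congr 1
  · have hf : List.filter ((fun rows : List (List (Option Int)) => decide (rows.length > 1))
          ∘ (fun x => grp data x)) (PySem.Set.ofList (ks data))
        = List.filter (qdup data) (PySem.Set.ofList (ks data)) := by
      apply List.filter_congr
      intro x _
      simp only [Function.comp_def, grp_length]
      rfl
    rw [hf]
    apply List.map_congr_left
    intro x _
    simp [nonNoneSum_eq]
  · have hf : List.filter ((fun rows : List (List (Option Int)) => !decide (rows.length > 1))
          ∘ (fun x => grp data x)) (PySem.Set.ofList (ks data))
        = List.filter (fun x => !qdup data x) (PySem.Set.ofList (ks data)) := by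
      apply List.filter_congr
      intro x _
      simp only [Function.comp_def, grp_length]
      rfl
    rw [hf]
    exact singles_map data (fun x => !qdup data x) hq1

-- ===== VERDICT (by name: the statement is the Claim_ definition above) =====
theorem keep_richest_duplicates_py_spec : Claim_equal_keep_richest_duplicates_py := by
  unfold Claim_equal_keep_richest_duplicates_py
  intro data _ _
  unfold Spec_keep_richest_duplicates_py
  rw [portA_eq, portB_eq]
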